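-- pv_equiv track=rewrite | github.com/holdestmade/Unifi-WAN | unifi_wan/binary_sensor.py | _pick_gateway
-- ===== SOURCE A (Python) =====
-- from typing import Any
--
-- def _pick_gateway(payload: dict[str, Any] | None) -> dict[str, Any] | None:
--     if not isinstance(payload, dict):
--         return None
--     data = payload.get("data")
--     if not isinstance(data, list):
--         return None
--     for t in ("udm", "ugw"):
--         for dev in data:
--             if isinstance(dev, dict) and dev.get("type") == t:
--                 return dev
--     return None
-- ===== SOURCE B (Python) =====
-- from typing import Any
--
--
-- def _pick_gateway(payload: dict[str, Any] | None) -> dict[str, Any] | None: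
--     if not isinstance(payload, dict):
--         return None
--     data = payload.get("data")
--     if not isinstance(data, list):
--         return None
--     ugw = None
--     for dev in data:
--         if isinstance(dev, dict):
--             t = dev.get("type")
--             if t == "udm":
--                 return dev
--             if t == "ugw" and ugw is None:
--                 ugw = dev
--     return ugw
-- ===== Notes on version B (the rewrite author's own statement) =====
-- stated objective: simpler
-- what changed: Replaced the priority-ordered double scan over data (once per gateway type) with a single pass that returns the first 'udm' immediately and remembers the first 'ugw' as a fallback.
import Mathlib
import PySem

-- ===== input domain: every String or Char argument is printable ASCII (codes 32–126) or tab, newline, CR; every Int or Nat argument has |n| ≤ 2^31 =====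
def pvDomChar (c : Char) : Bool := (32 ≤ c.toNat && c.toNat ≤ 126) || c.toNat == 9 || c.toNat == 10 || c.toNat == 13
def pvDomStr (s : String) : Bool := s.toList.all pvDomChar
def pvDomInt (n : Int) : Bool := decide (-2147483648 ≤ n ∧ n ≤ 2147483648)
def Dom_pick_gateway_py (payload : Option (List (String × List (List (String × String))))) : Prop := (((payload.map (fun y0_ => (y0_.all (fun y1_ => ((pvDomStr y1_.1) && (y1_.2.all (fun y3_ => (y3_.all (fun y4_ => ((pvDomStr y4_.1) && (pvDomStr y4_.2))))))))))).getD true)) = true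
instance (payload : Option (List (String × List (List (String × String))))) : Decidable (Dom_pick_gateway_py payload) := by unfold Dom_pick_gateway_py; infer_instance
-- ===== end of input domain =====

-- ===== PORT A =====
-- B replaces A's two-pass priority scan with one pass remembering the first 'ugw' (objective: simpler).

-- inner loop: 'for dev in data: if dev.get("type") == t: return dev'
def pgPickInner (data : List (List (String × String))) (t : String) : Option (List (String × String)) :=
  match data with
  | [] => none
  | dev :: rest =>
    if PySem.Dict.get? (PySem.Dict.mk dev) "type" == some t then some dev
    else pgPickInner rest t

-- outer loop: 'for t in ("udm", "ugw"): …'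
def pgPickOuter (ts : List String) (data : List (List (String × String))) : Option (List (String × String)) :=
  match ts with
  | [] => none
  | t :: rest =>
    match pgPickInner data t with
    | some dev => some dev
    | none => pgPickOuter rest data

def pick_gateway_py (payload : Option (List (String × List (List (String × String))))) : Option (List (String × String)) :=
  match payload with
  | none => none
  | some p =>
    match PySem.Dict.get? (PySem.Dict.mk p) "data" with
    | none => none                        -- payload.get("data") is None: not a list
    | some data => pgPickOuter ["udm", "ugw"] data

-- ===== PORT B =====
-- single pass: return first 'udm' immediately, keep the FIRST 'ugw' in an accumulator
def pgLoop (data : List (List (String × String))) (ugw : Option (List (String × String))) : Option (List (String × String)) :=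
  match data with
  | [] => ugw
  | dev :: rest =>
    let t := PySem.Dict.get? (PySem.Dict.mk dev) "type"
    if t == some "udm" then some dev
    else pgLoop rest (if t == some "ugw" && ugw.isNone then some dev else ugw)

def pick_gateway_py_alt (payload : Option (List (String × List (List (String × String))))) : Option (List (String × String)) :=
  match payload with
  | none => none
  | some p =>
    match PySem.Dict.get? (PySem.Dict.mk p) "data" with
    | none => none
    | some data => pgLoop data none

-- ===== PRECONDITION & SPEC =====
def Spec_pick_gateway_py (payload : Option (List (String × List (List (String × String))))) (out : Option (List (String × String))) : Prop := out = pick_gateway_py_alt payload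
instance (payload : Option (List (String × List (List (String × String))))) (out : Option (List (String × String))) : Decidable (Spec_pick_gateway_py payload out) := by unfold Spec_pick_gateway_py; infer_instance

-- ===== CLAIM (what is proved, stated in full; the proofs are below) =====
def Claim_equal_pick_gateway_py : Prop := ∀ (payload : Option (List (String × List (List (String × String))))), Dom_pick_gateway_py payload → Spec_pick_gateway_py payload (pick_gateway_py payload)

-- ===== LEMMAS AND PROOFS =====

-- B's single pass equals: first 'udm' if any, else the accumulator if set, else first 'ugw'
theorem pgLoop_eq (data : List (List (String × String))) (acc : Option (List (String × String))) :
    pgLoop data acc =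
      match pgPickInner data "udm" with
      | some dev => some dev
      | none => match acc with
                | some a => some a
                | none => pgPickInner data "ugw" := by
  induction data generalizing acc with
  | nil => cases acc <;> simp [pgLoop, pgPickInner]
  | cons dev rest ih =>
    simp only [pgLoop, pgPickInner]
    by_cases hu : PySem.Dict.get? (PySem.Dict.mk dev) "type" == some "udm"
    · simp [hu]
    · simp only [hu, if_neg, Bool.false_eq_true, not_false_iff, ih]
      by_cases hg : PySem.Dict.get? (PySem.Dict.mk dev) "type" == some "ugw"
      · cases acc <;> simp [hg]
      · cases acc <;> simp [hg]

-- ===== VERDICT (by name: the statement is the Claim_ definition above) =====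
theorem pick_gateway_py_spec : Claim_equal_pick_gateway_py := by
  intro payload _
  unfold Spec_pick_gateway_py pick_gateway_py pick_gateway_py_alt
  cases payload with
  | none => rfl
  | some p =>
    cases hd : PySem.Dict.get? (PySem.Dict.mk p) "data" with
    | none => simp [hd]
    | some data =>
      simp only [hd, pgLoop_eq, pgPickOuter]
      cases pgPickInner data "udm" with
      | some dev => rfl
      | none => cases pgPickInner data "ugw" <;> rfl
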